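-- pv_equiv track=rewrite | github.com/nj-vs-vh/advent-of-code-2023 | day13/solution.py | find_mirror_points
-- ===== SOURCE A (Python) =====
-- from typing import Literal, Optional
--
-- MapCell = Literal[".", "#"]
--
-- ROCK: MapCell = "#"
--
-- def low_bits(num: int, count: int) -> int:
--     return num & ((1 << count) - 1)
--
-- def high_bits(num: int, full_length: int, count: int) -> int:
--     if full_length < count:
--         return num
--     else:
--         return num >> (full_length - count)
--
-- def find_mirror_points(row: tuple[MapCell, ...]) -> tuple[set[int], set[int]]:
--     length = len(row)
--     bit_chars = ["1" if c is ROCK else "0" for c in row]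
--     normal = int("".join(bit_chars), base=2)
--     reflected = int("".join(reversed(bit_chars)), base=2)
--
--     abs_max_offset = length - 2
--     mirror_points: set[int] = set()
--     mirror_points_with_smudge: set[int] = set()
--     for offset in range(-abs_max_offset, abs_max_offset + 1, 2):
--         overlap_length = length - abs(offset)
--         mirror_point = (length + offset) // 2 - 1
--         if offset < 0:
--             normal_part = high_bits(normal, full_length=length, count=overlap_length)
--             reflected_part = low_bits(reflected, count=overlap_length)
--         else:
--             normal_part = low_bits(normal, count=overlap_length)
--             reflected_part = high_bits(reflected, full_length=length, count=overlap_length)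
--
--         match (normal_part ^ reflected_part).bit_count():
--             case 0:  # zero bits difference = perfect reflection
--                 mirror_points.add(mirror_point)
--             case 2:  # one smidge causes two-bit difference (one in normal and one in reflected parts)
--                 mirror_points_with_smudge.add(mirror_point)
--     return mirror_points, mirror_points_with_smudge
-- ===== SOURCE B (Python) =====
-- def find_mirror_points(row):
--     rocks = [c == "#" for c in row]
--     n = len(rocks)
--     mirror_points = set()
--     mirror_points_with_smudge = set()
--     for p in range(n - 1):
--         mismatches = sum(1 for a, b in zip(reversed(rocks[:p + 1]), rocks[p + 1:]) if a != b)
--         if mismatches == 0: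
--             mirror_points.add(p)
--         elif mismatches == 1:
--             mirror_points_with_smudge.add(p)
--     return mirror_points, mirror_points_with_smudge
-- ===== Notes on version B (the rewrite author's own statement) =====
-- stated objective: simpler
-- what changed: B drops A's big-integer machinery (packing the row into two binary numbers, shifting/masking out the overlap and popcounting their xor) and instead counts, per fold position, the mismatching pairs directly by zipping the reversed prefix with the suffix of the rock/no-rock booleans.
-- crash fix: A raises ValueError on the empty row (int('', base=2)); B returns (set(), set()). — e.g. on find_mirror_points([]): A raises ValueError, B returns ([], [])
import Mathlib
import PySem

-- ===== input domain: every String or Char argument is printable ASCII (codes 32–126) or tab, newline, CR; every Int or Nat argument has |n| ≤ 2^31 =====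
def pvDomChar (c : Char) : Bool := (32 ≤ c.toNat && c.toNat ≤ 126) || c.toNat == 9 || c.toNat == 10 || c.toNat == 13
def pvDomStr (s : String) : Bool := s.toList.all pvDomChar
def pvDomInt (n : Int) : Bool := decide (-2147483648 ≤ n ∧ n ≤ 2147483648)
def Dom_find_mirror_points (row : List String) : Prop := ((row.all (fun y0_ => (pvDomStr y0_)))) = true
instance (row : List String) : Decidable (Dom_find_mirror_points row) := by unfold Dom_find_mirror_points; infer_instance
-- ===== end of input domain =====

-- B replaces A's big-integer bit packing / shifting / popcount with a direct per-fold
-- mismatch count over booleans (objective: simpler; same O(n^2) operation count, but it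
-- gives up A's word-parallel bigint constant factor, so it is not faster).

-- ===== PORT A =====
-- A's helpers low_bits / high_bits and int.bit_count are only applied to nonnegative ints
-- here, so they are Nat-typed; exact on that domain.
def pvLowBits (num : Nat) (count : Nat) : Nat := num &&& ((1 <<< count) - 1)

def pvHighBits (num : Nat) (full_length : Nat) (count : Nat) : Nat :=
  if full_length < count then num else num >>> (full_length - count)

-- int("".join(bit_chars), base=2) where every joined element is exactly "1" or "0":
-- the base-2 left fold over those bits, exact (raises ValueError on the empty join,
-- excluded by Pre_).
def pvBinVal (bits : List Bool) : Nat :=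
  bits.foldl (fun acc b => 2 * acc + (if b then 1 else 0)) 0

def find_mirror_points (row : List String) : List Int × List Int :=
  let length := row.length
  -- `"1" if c is ROCK else "0"`: 1-char strings are interned in CPython, so `c is "#"` ⟺ c == "#"
  let bit_chars : List Bool := row.map (fun c => c == "#")
  let normal := pvBinVal bit_chars
  let reflected := pvBinVal bit_chars.reverse
  let abs_max_offset : Int := (length : Int) - 2
  (PySem.List.pyRange (-abs_max_offset) (abs_max_offset + 1) 2).foldl
    (fun (st : PySem.Set Int × PySem.Set Int) offset =>
      -- length - abs(offset) ≥ 0 for every offset of the range, so Nat subtraction is exact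
      let overlap_length : Nat := length - offset.natAbs
      let mirror_point : Int := PySem.Int.floordiv ((length : Int) + offset) 2 - 1
      let parts : Nat × Nat :=
        if offset < 0 then
          (pvHighBits normal length overlap_length, pvLowBits reflected overlap_length)
        else
          (pvLowBits normal overlap_length, pvHighBits reflected length overlap_length)
      match PySem.Int.bitCount ((parts.1 ^^^ parts.2 : Nat) : Int) with
      | 0 => (st.1.add mirror_point, st.2)
      | 2 => (st.1, st.2.add mirror_point)
      | _ => st)
    (PySem.Set.empty, PySem.Set.empty)

-- ===== PORT B =====
def find_mirror_points_alt (row : List String) : List Int × List Int :=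
  let rocks : List Bool := row.map (fun c => c == "#")
  let n := rocks.length
  (PySem.List.pyRange 0 ((n : Int) - 1) 1).foldl
    (fun (st : PySem.Set Int × PySem.Set Int) p =>
      -- sum(1 for a, b in zip(reversed(rocks[:p+1]), rocks[p+1:]) if a != b)
      let mismatches := List.countP (fun ab => ab.1 != ab.2)
        ((PySem.List.slice rocks none (some (p + 1))).reverse.zip
          (PySem.List.slice rocks (some (p + 1)) none))
      if mismatches = 0 then (st.1.add p, st.2)
      else if mismatches = 1 then (st.1, st.2.add p)
      else st)
    (PySem.Set.empty, PySem.Set.empty)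

-- ===== PRECONDITION & SPEC =====
-- Pre_ excludes only the empty row, on which A raises ValueError (int("", base=2)).
def Pre_find_mirror_points (row : List String) : Prop := row ≠ []
instance (row : List String) : Decidable (Pre_find_mirror_points row) := by
  unfold Pre_find_mirror_points; infer_instance

def pvWitness_find_mirror_points : List String := ["#", ".", ".", "#", "#"]

-- A raises ValueError on the empty row (int("", base=2)); B returns (set(), set()).
def Raises_find_mirror_points (row : List String) : Prop := row = []
instance (row : List String) : Decidable (Raises_find_mirror_points row) := by
  unfold Raises_find_mirror_points; infer_instance
def pvRaiseWitness_find_mirror_points : List String := []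
def pvRaiseWitnessOut_find_mirror_points : List Int × List Int := ([], [])

def Spec_find_mirror_points (row : List String) (out : List Int × List Int) : Prop :=
  out = find_mirror_points_alt row
instance (row : List String) (out : List Int × List Int) : Decidable (Spec_find_mirror_points row out) := by
  unfold Spec_find_mirror_points; infer_instance

-- ===== CLAIM (what is proved, stated in full; the proofs are below) =====
def Claim_equal_find_mirror_points : Prop := ∀ (row : List String), Dom_find_mirror_points row →
  Pre_find_mirror_points row → Spec_find_mirror_points row (find_mirror_points row)

def Claim_raises_find_mirror_points : Prop :=
  (∀ (row : List String), Dom_find_mirror_points row → Raises_find_mirror_points row →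
    ¬ Pre_find_mirror_points row) ∧
  (Dom_find_mirror_points (pvRaiseWitness_find_mirror_points) ∧
    Raises_find_mirror_points (pvRaiseWitness_find_mirror_points) ∧
    find_mirror_points_alt (pvRaiseWitness_find_mirror_points) = pvRaiseWitnessOut_find_mirror_points)

-- ===== LEMMAS AND PROOFS =====

theorem pvTwoPow {n : Nat} : (0:Nat) < 2 ^ n := Nat.two_pow_pos n

theorem pvBinVal_foldl_acc (y : List Bool) (acc : Nat) :
    y.foldl (fun a b => 2 * a + (if b then 1 else 0)) acc = acc * 2 ^ y.length + pvBinVal y := by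
  induction y generalizing acc with
  | nil => simp [pvBinVal]
  | cons b y ih =>
    simp only [List.foldl_cons, List.length_cons, pvBinVal]
    rw [ih (2 * acc + _), ih (2 * 0 + _)]
    ring

theorem pvBinVal_append (x y : List Bool) :
    pvBinVal (x ++ y) = pvBinVal x * 2 ^ y.length + pvBinVal y := by
  simp only [pvBinVal, List.foldl_append]
  exact pvBinVal_foldl_acc y _

theorem pvBinVal_lt (y : List Bool) : pvBinVal y < 2 ^ y.length := by
  induction y with
  | nil => simp [pvBinVal]
  | cons b y ih =>
    have h := pvBinVal_foldl_acc y (2 * 0 + (if b then 1 else 0))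
    simp only [pvBinVal, List.foldl_cons, List.length_cons] at *
    rw [h]
    have : (if b then 1 else 0) ≤ 1 := by split <;> omega
    have h2 : (0:Nat) < 2 ^ y.length := pvTwoPow
    rw [pow_succ]
    nlinarith

theorem pvBinVal_concat (l : List Bool) (b : Bool) :
    pvBinVal (l ++ [b]) = 2 * pvBinVal l + (if b then 1 else 0) := by
  rw [pvBinVal_append]; simp [pvBinVal]; ring

theorem pvHigh_eq_take (l : List Bool) (k : Nat) (_hk : k ≤ l.length) :
    pvBinVal l >>> (l.length - k) = pvBinVal (l.take k) := by
  conv_lhs => rw [← List.take_append_drop k l]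
  rw [pvBinVal_append, Nat.shiftRight_eq_div_pow]
  have hlen : (l.drop k).length = l.length - k := by simp
  have hlen2 : (l.take k ++ l.drop k).length = l.length := by simp
  rw [hlen, hlen2]
  have h2 : (0:Nat) < 2 ^ (l.length - k) := pvTwoPow
  rw [Nat.mul_comm, Nat.mul_add_div h2]
  rw [Nat.div_eq_of_lt (hlen ▸ pvBinVal_lt (l.drop k))]
  omega

theorem pvLow_eq_drop (l : List Bool) (k : Nat) (hk : k ≤ l.length) :
    pvBinVal l &&& ((1 <<< k) - 1) = pvBinVal (l.drop (l.length - k)) := by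
  rw [Nat.one_shiftLeft, Nat.and_two_pow_sub_one_eq_mod]
  conv_lhs => rw [← List.take_append_drop (l.length - k) l]
  rw [pvBinVal_append]
  have hlen : (l.drop (l.length - k)).length = k := by simp; omega
  have hlt : pvBinVal (l.drop (l.length - k)) < 2 ^ k := by
    have := pvBinVal_lt (l.drop (l.length - k)); rwa [hlen] at this
  rw [hlen, Nat.mul_comm, Nat.mul_add_mod_self_left, Nat.mod_eq_of_lt hlt]

theorem pvXor_zipWith (x : List Bool) : ∀ (y : List Bool), x.length = y.length →
    pvBinVal x ^^^ pvBinVal y = pvBinVal (List.zipWith bne x y) := by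
  induction x using List.reverseRecOn with
  | nil => intro y h; simp [List.length_eq_zero_iff.mp h.symm, pvBinVal]
  | append_singleton x b ih =>
    intro y h
    induction y using List.reverseRecOn with
    | nil => simp at h
    | append_singleton y' c _ =>
      simp only [List.length_append, List.length_singleton] at h
      have hlen : x.length = y'.length := by omega
      have hz : List.zipWith bne [b] [c] = [bne b c] := rfl
      rw [List.zipWith_append hlen, hz, pvBinVal_concat, pvBinVal_concat, pvBinVal_concat]
      have hbit : ∀ (d : Bool) (m : Nat), Nat.bit d m = 2 * m + (if d then 1 else 0) := by
        intro d m; cases d <;> simp [Nat.bit]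
      rw [← hbit, ← hbit, ← hbit]
      show Nat.bitwise bne _ _ = _
      rw [Nat.bitwise_bit rfl,
        show Nat.bitwise bne (pvBinVal x) (pvBinVal y') = pvBinVal x ^^^ pvBinVal y' from rfl,
        ih y' hlen]

theorem pvBinVal_zero_count (l : List Bool) (h : pvBinVal l = 0) : l.count true = 0 := by
  induction l using List.reverseRecOn with
  | nil => simp
  | append_singleton l b ih =>
    rw [pvBinVal_concat] at h
    have hb : b = false := by cases b with | false => rfl | true => simp at h
    have hl : pvBinVal l = 0 := by omega
    simp [hb, ih hl]

theorem pvBitCount_binVal (l : List Bool) :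
    PySem.Int.bitCount ((pvBinVal l : Nat) : Int) = l.count true := by
  induction l using List.reverseRecOn with
  | nil => simp [pvBinVal, PySem.Int.bitCount_zero]
  | append_singleton l b ih =>
    rw [pvBinVal_concat]
    by_cases h0 : 2 * pvBinVal l + (if b then 1 else 0) = 0
    · have hb : b = false := by cases b with | false => rfl | true => simp at h0
      have hl : pvBinVal l = 0 := by omega
      rw [h0]
      simp [hb, PySem.Int.bitCount_zero, pvBinVal_zero_count l hl]
    · rw [PySem.Int.bitCount_natCast (by omega)]
      have hdiv : (2 * pvBinVal l + (if b then 1 else 0)) / 2 = pvBinVal l := by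
        cases b with | false => simp | true => simp; omega
      have hmod : (2 * pvBinVal l + (if b then 1 else 0)) % 2 = (if b then 1 else 0) := by
        cases b with | false => simp | true => simp
      rw [hdiv, hmod, ih]
      cases b with | false => simp [List.count_append] | true => simp [List.count_append]; omega

theorem pvPalindrome_count (a b : List Bool) (h : a.length = b.length) :
    (List.zipWith bne (a.reverse ++ b) (a.reverse ++ b).reverse).count true
      = 2 * (List.zipWith bne a b).count true := by
  rw [List.reverse_append, List.reverse_reverse,
    List.zipWith_append (by simp [h]), List.count_append]
  have h1 : List.zipWith bne a.reverse b.reverse = (List.zipWith bne a b).reverse :=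
    (List.reverse_zipWith h).symm
  have h2 : List.zipWith bne b a = List.zipWith bne a b := by
    rw [List.zipWith_comm]
    congr 1; funext x y; cases x <;> cases y <;> rfl
  rw [h1, h2, List.count_reverse]; omega

theorem pvZipWith_take_min (L R : List Bool) :
    List.zipWith bne L R
      = List.zipWith bne (L.take (min L.length R.length)) (R.take (min L.length R.length)) := by
  induction L generalizing R with
  | nil => simp
  | cons a L ih =>
    cases R with
    | nil => simp
    | cons c R =>
      simp only [List.zipWith_cons_cons, List.length_cons]
      have : min (L.length + 1) (R.length + 1) = min L.length R.length + 1 := by omega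
      rw [this, List.take_succ_cons, List.take_succ_cons, List.zipWith_cons_cons, ← ih]

theorem pvCountP_zip (L R : List Bool) :
    List.countP (fun ab => ab.1 != ab.2) (L.zip R) = (List.zipWith bne L R).count true := by
  induction L generalizing R with
  | nil => simp
  | cons a L ih =>
    cases R with
    | nil => simp
    | cons c R =>
      simp only [List.zip_cons_cons, List.zipWith_cons_cons, List.countP_cons, List.count_cons, ih]
      cases a <;> cases c <;> rfl

theorem pvCore (t : List Bool) :
    PySem.Int.bitCount ((pvBinVal t ^^^ pvBinVal t.reverse : Nat) : Int)
      = (List.zipWith bne t t.reverse).count true := by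
  rw [pvXor_zipWith t t.reverse (by simp), pvBitCount_binVal]

theorem pvCaseNeg (s : List Bool) (k : Nat) (h : 2 * k + 2 < s.length) :
    pvHighBits (pvBinVal s) s.length (2 * k + 2) = pvBinVal (s.take (2 * k + 2))
    ∧ pvLowBits (pvBinVal s.reverse) (2 * k + 2) = pvBinVal (s.take (2 * k + 2)).reverse := by
  constructor
  · rw [pvHighBits, if_neg (by omega)]
    exact pvHigh_eq_take s (2 * k + 2) (by omega)
  · rw [pvLowBits, pvLow_eq_drop s.reverse (2 * k + 2) (by simp; omega),
      List.length_reverse, List.drop_reverse,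
      show s.length - (s.length - (2 * k + 2)) = 2 * k + 2 from by omega]

theorem pvCaseNonneg (s : List Bool) (k : Nat) (hk : k < s.length - 1)
    (h : s.length ≤ 2 * k + 2) :
    pvLowBits (pvBinVal s) (2 * s.length - (2 * k + 2))
        = pvBinVal (s.drop (2 * k + 2 - s.length))
    ∧ pvHighBits (pvBinVal s.reverse) s.length (2 * s.length - (2 * k + 2))
        = pvBinVal (s.drop (2 * k + 2 - s.length)).reverse := by
  constructor
  · rw [pvLowBits, pvLow_eq_drop s (2 * s.length - (2 * k + 2)) (by omega),
      show s.length - (2 * s.length - (2 * k + 2)) = 2 * k + 2 - s.length from by omega]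
  · rw [pvHighBits, if_neg (by omega)]
    have := pvHigh_eq_take s.reverse (2 * s.length - (2 * k + 2)) (by simp; omega)
    rw [List.length_reverse] at this
    rw [this, List.take_reverse,
      show s.length - (2 * s.length - (2 * k + 2)) = 2 * k + 2 - s.length from by omega]

theorem pvCountNeg (s : List Bool) (k : Nat) (h : 2 * k + 2 < s.length) :
    (List.zipWith bne (s.take (2 * k + 2)) (s.take (2 * k + 2)).reverse).count true
      = 2 * (List.zipWith bne (s.take (k + 1)).reverse (s.drop (k + 1))).count true := by
  have hb : ((s.drop (k + 1)).take (k + 1)).length = k + 1 := by simp; omega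
  have ha : ((s.take (k + 1)).reverse).length = k + 1 := by simp; omega
  have ht : s.take (2 * k + 2) = ((s.take (k + 1)).reverse).reverse ++ (s.drop (k + 1)).take (k + 1) := by
    rw [List.reverse_reverse, show 2 * k + 2 = (k + 1) + (k + 1) from by omega, List.take_add]
  rw [ht, pvPalindrome_count _ _ (by rw [ha, hb])]
  congr 1
  rw [pvZipWith_take_min ((s.take (k + 1)).reverse) (s.drop (k + 1))]
  have hm : min ((s.take (k + 1)).reverse).length (s.drop (k + 1)).length = k + 1 := by
    simp; omega
  rw [hm, List.take_of_length_le (le_of_eq ha)]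

theorem pvCountNonneg (s : List Bool) (k : Nat) (hk : k < s.length - 1)
    (h : s.length ≤ 2 * k + 2) :
    (List.zipWith bne (s.drop (2 * k + 2 - s.length)) (s.drop (2 * k + 2 - s.length)).reverse).count true
      = 2 * (List.zipWith bne (s.take (k + 1)).reverse (s.drop (k + 1))).count true := by
  have hn1 : k + 1 ≤ s.length := by omega
  have ha : (((s.take (k + 1)).reverse).take (s.length - 1 - k)).length = s.length - 1 - k := by
    simp; omega
  have hb : (s.drop (k + 1)).length = s.length - 1 - k := by simp; omega
  have hrev : (((s.take (k + 1)).reverse).take (s.length - 1 - k)).reverse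
      = (s.take (k + 1)).drop (2 * k + 2 - s.length) := by
    rw [List.take_reverse, List.reverse_reverse,
      show (s.take (k + 1)).length - (s.length - 1 - k) = 2 * k + 2 - s.length from by
        simp; omega]
  have ht : s.drop (2 * k + 2 - s.length)
      = (((s.take (k + 1)).reverse).take (s.length - 1 - k)).reverse ++ s.drop (k + 1) := by
    rw [hrev]
    conv_lhs => rw [← List.take_append_drop (k + 1) s]
    rw [List.drop_append, List.take_append_drop,
      show (s.take (k + 1)).length = k + 1 from by simp; omega,
      show 2 * k + 2 - s.length - (k + 1) = 0 from by omega,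
      List.drop_zero]
  rw [ht, pvPalindrome_count _ _ (by rw [ha, hb])]
  congr 1
  rw [pvZipWith_take_min ((s.take (k + 1)).reverse) (s.drop (k + 1))]
  have hm : min ((s.take (k + 1)).reverse).length (s.drop (k + 1)).length = s.length - 1 - k := by
    simp; omega
  rw [hm, List.take_of_length_le (le_of_eq hb)]

-- ===== VERDICT (by name: the statement is the Claim_ definition above) =====
theorem find_mirror_points_spec : Claim_equal_find_mirror_points := by
  intro row _ hpre
  have hn : 1 ≤ row.length := List.length_pos_of_ne_nil hpre
  simp only [Spec_find_mirror_points, find_mirror_points, find_mirror_points_alt]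
  rw [PySem.List.pyRange_of_pos _ _ (by norm_num : (0:Int) < 2), PySem.List.pyRange_one]
  rw [show (if -((row.length:Int) - 2) < ((row.length:Int) - 2) + 1 then
        ((((row.length:Int) - 2) + 1 - -((row.length:Int) - 2) + 2 - 1) / 2).toNat else 0)
      = row.length - 1 from by split_ifs <;> omega]
  rw [show ((↑(List.map (fun c => c == "#") row).length - 1 - 0 : Int)).toNat = row.length - 1
      from by simp]
  rw [List.foldl_map, List.foldl_map]
  have hsl : (List.map (fun c => c == "#") row).length = row.length := by simp
  apply PySem.List.foldl_congr_mem
  intro st k hkmem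
  have hk : k < row.length - 1 := List.mem_range.mp hkmem
  rw [← hsl] at hk hn
  rw [← hsl]
  set s := List.map (fun c => c == "#") row with hs
  have hmp : PySem.Int.floordiv ((s.length : Int) + (-((s.length : Int) - 2) + 2 * (k : Int))) 2 - 1
      = (k : Int) := by
    rw [PySem.Int.floordiv_eq_ediv_of_pos (by norm_num : (0:Int) < 2)]
    omega
  have hidx : (0 : Int) + (k : Int) + 1 = ((k + 1 : Nat) : Int) := by push_cast; ring
  rw [hmp, hidx, PySem.List.slice_to s (b := ((k + 1 : Nat) : Int)) (by omega),
    PySem.List.slice_from s (a := ((k + 1 : Nat) : Int)) (by omega), Int.toNat_natCast,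
    pvCountP_zip, show (0 : Int) + (k : Int) = (k : Int) from by ring]
  by_cases hcase : 2 * k + 2 < s.length
  · have hoff : -((s.length : Int) - 2) + 2 * (k : Int) < 0 := by omega
    rw [if_pos hoff]
    have hovl : s.length - (-((s.length : Int) - 2) + 2 * (k : Int)).natAbs = 2 * k + 2 := by
      omega
    rw [hovl]
    show (match PySem.Int.bitCount _ with
      | 0 => _ | 2 => _ | _ => _) = _
    rw [(pvCaseNeg s k hcase).1, (pvCaseNeg s k hcase).2, pvCore, pvCountNeg s k hcase]
    generalize (List.zipWith bne (s.take (k + 1)).reverse (s.drop (k + 1))).count true = c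
    split
    · next h0 => rw [if_pos (show c = 0 from by omega)]
    · next h2 =>
        rw [if_neg (show ¬ c = 0 from by omega), if_pos (show c = 1 from by omega)]
    · next h0 h2 =>
        rw [if_neg (show ¬ c = 0 from fun h => h0 (by omega)),
          if_neg (show ¬ c = 1 from fun h => h2 (by omega))]
  · have hoff : ¬ (-((s.length : Int) - 2) + 2 * (k : Int) < 0) := by omega
    have hle : s.length ≤ 2 * k + 2 := by omega
    rw [if_neg hoff]
    have hovl : s.length - (-((s.length : Int) - 2) + 2 * (k : Int)).natAbs
        = 2 * s.length - (2 * k + 2) := by omega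
    rw [hovl]
    rw [(pvCaseNonneg s k hk hle).1, (pvCaseNonneg s k hk hle).2, pvCore,
      pvCountNonneg s k hk hle]
    generalize (List.zipWith bne (s.take (k + 1)).reverse (s.drop (k + 1))).count true = c
    split
    · next h0 => rw [if_pos (show c = 0 from by omega)]
    · next h2 =>
        rw [if_neg (show ¬ c = 0 from by omega), if_pos (show c = 1 from by omega)]
    · next h0 h2 =>
        rw [if_neg (show ¬ c = 0 from fun h => h0 (by omega)),
          if_neg (show ¬ c = 1 from fun h => h2 (by omega))]

def find_mirror_points_raises : Claim_raises_find_mirror_points := by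
  unfold Claim_raises_find_mirror_points
  exact ⟨fun row _ h => by simp [Raises_find_mirror_points] at h; simp [Pre_find_mirror_points, h],
    by decide⟩
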